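-- pv_equiv track=rewrite | github.com/skromez/composingprograms | linked_list.py | join_dict
-- ===== SOURCE A (Python) =====
-- def first_d(d):
--     return d[0]
--
-- def rest_d(d):
--     return d[1:]
--
-- def join_dict(d, separator):
--     if len(rest_d(d)) == 0:
--         key, value = first_d(d)
--         return "(" + str(key) + "," + str(value) + ")"
--     else:
--         key, value = first_d(d)
--         return (
--             "("
--             + str(key)
--             + ","
--             + str(value)
--             + ")"
--             + separator
--             + join_dict(rest_d(d), separator)
--         )
-- ===== SOURCE B (Python) =====
-- def _fmt(pair):
--     return "(" + str(pair[0]) + "," + str(pair[1]) + ")"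
--
-- def join_dict(d, separator):
--     result = _fmt(d[0])
--     for pair in d[1:]:
--         result += separator + _fmt(pair)
--     return result
-- ===== Notes on version B (the rewrite author's own statement) =====
-- stated objective: faster
-- what changed: Replaces A's tail-recursion with a slice copy of the tail at every call by a single iterative loop over d[1:] accumulating the string in place.
import Mathlib
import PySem

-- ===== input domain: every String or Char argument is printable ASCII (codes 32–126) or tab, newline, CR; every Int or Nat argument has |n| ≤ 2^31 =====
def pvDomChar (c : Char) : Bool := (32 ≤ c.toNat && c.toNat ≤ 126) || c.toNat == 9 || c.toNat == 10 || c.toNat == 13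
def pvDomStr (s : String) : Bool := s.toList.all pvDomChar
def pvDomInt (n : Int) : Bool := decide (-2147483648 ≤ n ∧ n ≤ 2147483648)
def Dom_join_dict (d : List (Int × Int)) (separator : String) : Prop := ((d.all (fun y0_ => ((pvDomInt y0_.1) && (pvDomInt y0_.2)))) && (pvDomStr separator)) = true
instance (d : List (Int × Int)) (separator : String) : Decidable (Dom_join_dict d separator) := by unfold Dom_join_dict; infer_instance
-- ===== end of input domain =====

-- B replaces A's recursion (with a slice copy per call) by one iterative loop; objective: simpler.

-- ===== PORT A =====
-- A: if len(d[1:]) == 0 return "(k,v)" else "(k,v)" + separator + join_dict(d[1:], separator)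
def join_dict (d : List (Int × Int)) (separator : String) : String :=
  match d with
  | [] => ""  -- unreachable: Python A raises IndexError here, excluded by Pre_
  | (key, value) :: rest =>
    if rest.length = 0 then
      "(" ++ PySem.Int.toStr key ++ "," ++ PySem.Int.toStr value ++ ")"
    else
      "(" ++ PySem.Int.toStr key ++ "," ++ PySem.Int.toStr value ++ ")"
        ++ separator ++ join_dict rest separator

-- ===== PORT B =====
def fmtPair (pair : Int × Int) : String :=
  "(" ++ PySem.Int.toStr pair.1 ++ "," ++ PySem.Int.toStr pair.2 ++ ")"

def join_dict_alt (d : List (Int × Int)) (separator : String) : String :=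
  match d with
  | [] => ""  -- unreachable: Python B raises IndexError on d[0], excluded by Pre_
  | first :: rest =>
    rest.foldl (fun result pair => result ++ separator ++ fmtPair pair) (fmtPair first)

-- ===== PRECONDITION & SPEC =====
-- A (and B) raise IndexError on the empty list; Pre_ excludes exactly that.
def Pre_join_dict (d : List (Int × Int)) (separator : String) : Prop := d ≠ []
instance (d : List (Int × Int)) (separator : String) : Decidable (Pre_join_dict d separator) := by unfold Pre_join_dict; infer_instance
def pvWitness_join_dict : (List (Int × Int)) × String := ([(1, 2)], ", ")

def Spec_join_dict (d : List (Int × Int)) (separator : String) (out : String) : Prop := out = join_dict_alt d separator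
instance (d : List (Int × Int)) (separator : String) (out : String) : Decidable (Spec_join_dict d separator out) := by unfold Spec_join_dict; infer_instance

-- ===== CLAIM (what is proved, stated in full; the proofs are below) =====
def Claim_equal_join_dict : Prop := ∀ (d : List (Int × Int)) (separator : String), Dom_join_dict d separator → Pre_join_dict d separator → Spec_join_dict d separator (join_dict d separator)

-- ===== LEMMAS AND PROOFS =====

theorem foldl_pull_prefix (sep a b : String) (l : List (Int × Int)) :
    l.foldl (fun result pair => result ++ sep ++ fmtPair pair) (a ++ b)
      = a ++ l.foldl (fun result pair => result ++ sep ++ fmtPair pair) b := by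
  induction l generalizing b with
  | nil => rfl
  | cons x xs ih =>
    rw [List.foldl_cons, List.foldl_cons,
      show a ++ b ++ sep ++ fmtPair x = a ++ (b ++ sep ++ fmtPair x) by
        simp [String.append_assoc]]
    exact ih (b ++ sep ++ fmtPair x)

theorem join_dict_cons (sep : String) (x : Int × Int) (rest : List (Int × Int)) :
    join_dict (x :: rest) sep
      = rest.foldl (fun result pair => result ++ sep ++ fmtPair pair) (fmtPair x) := by
  induction rest generalizing x with
  | nil => simp [join_dict, fmtPair]
  | cons y ys ih =>
    have hA : join_dict (x :: y :: ys) sep = fmtPair x ++ sep ++ join_dict (y :: ys) sep := by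
      obtain ⟨k, v⟩ := x
      simp [join_dict, fmtPair]
    rw [hA, ih y, List.foldl_cons, ← foldl_pull_prefix sep (fmtPair x ++ sep) (fmtPair y) ys]

-- ===== VERDICT (by name: the statement is the Claim_ definition above) =====
theorem join_dict_spec : Claim_equal_join_dict := by
  intro d sep _ hpre
  match d with
  | [] => exact absurd rfl hpre
  | x :: rest =>
    unfold Spec_join_dict join_dict_alt
    exact join_dict_cons sep x rest
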